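-- pv_equiv track=rewrite | github.com/BeBoop-Beep/EVRCalculator | backend/db/services/public_identity_service.py | normalize_public_username
-- ===== SOURCE A (Python) =====
-- from typing import Any, Dict, Optional, Tuple
--
-- def normalize_public_username(username: Any) -> str:
--     if not isinstance(username, str):
--         return ""
--
--     normalized = username.strip().lower()
--     normalized = " ".join(normalized.split())
--     normalized = normalized.replace(" ", "-")
--     normalized = "".join(ch for ch in normalized if ch.isalnum() or ch in {"-", "_", "."})
--     normalized = normalized.strip("-._")
--     return normalized
-- ===== SOURCE B (Python) =====
-- def normalize_public_username(username):
--     if not isinstance(username, str):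
--         return ""
--     out = []
--     started = False
--     in_space = False
--     for ch in username.lower():
--         if ch.isspace():
--             in_space = True
--         else:
--             if in_space and started:
--                 out.append("-")
--             in_space = False
--             started = True
--             if ch.isalnum() or ch in "-_.":
--                 out.append(ch)
--     return "".join(out).strip("-._")
-- ===== Notes on version B (the rewrite author's own statement) =====
-- stated objective: alternative
-- what changed: Replaced A's six staged passes (strip, lower, whitespace split/join, space-to-hyphen replace, filter, edge strip) by a single left-to-right scan over the lowercased input that tracks started/in_space flags, emits one hyphen per internal whitespace run and filters characters on the fly, followed by the same final edge strip of hyphen, dot and underscore.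
import Mathlib
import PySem

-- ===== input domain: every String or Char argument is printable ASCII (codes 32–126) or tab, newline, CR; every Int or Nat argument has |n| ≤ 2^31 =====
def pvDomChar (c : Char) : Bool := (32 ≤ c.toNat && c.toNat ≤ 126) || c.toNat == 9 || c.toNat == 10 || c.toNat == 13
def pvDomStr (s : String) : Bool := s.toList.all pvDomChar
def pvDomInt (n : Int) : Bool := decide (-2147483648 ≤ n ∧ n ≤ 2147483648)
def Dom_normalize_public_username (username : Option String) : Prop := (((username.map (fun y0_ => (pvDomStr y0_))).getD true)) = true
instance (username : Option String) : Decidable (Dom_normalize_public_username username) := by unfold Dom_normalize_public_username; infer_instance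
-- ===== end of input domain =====

-- B makes one pass over username.lower() with started/in_space flags instead of A's
-- staged strip/split-join/replace/filter pipeline (objective: alternative decomposition).
-- 'username' is Option String: 'none' models a non-str argument (A's isinstance guard).

-- ===== PORT A =====
def normalize_public_username (username : Option String) : String :=
  match username with
  | none => ""
  | some u =>
    let n1 := PySem.Str.lower (PySem.Str.strip u)
    let n2 := PySem.Str.join " " (PySem.Str.split₀ n1)
    let n3 := PySem.Str.replace n2 " " "-"
    let n4 := String.ofList (n3.toList.filter
      (fun ch => PySem.Chars.isalnum ch || (ch == '-' || ch == '_' || ch == '.')))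
    PySem.Str.stripChars n4 "-._"

-- ===== PORT B =====
-- one step of B's loop: state = (emitted chars, started, in_space)
def pvBStep (s : List Char × Bool × Bool) (ch : Char) : List Char × Bool × Bool :=
  if PySem.Chars.isspace ch then (s.1, s.2.1, true)
  else (s.1 ++ (if s.2.2 && s.2.1 then ['-'] else [])
            ++ (if PySem.Chars.isalnum ch || (ch == '-' || ch == '_' || ch == '.')
                then [ch] else []),
        true, false)

def normalize_public_username_alt (username : Option String) : String :=
  match username with
  | none => ""
  | some u =>
    let st := (PySem.Str.lower u).toList.foldl pvBStep ([], false, false)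
    PySem.Str.stripChars (String.ofList st.1) "-._"

-- ===== PRECONDITION & SPEC =====
def Spec_normalize_public_username (username : Option String) (out : String) : Prop := out = normalize_public_username_alt username
instance (username : Option String) (out : String) : Decidable (Spec_normalize_public_username username out) := by unfold Spec_normalize_public_username; infer_instance

-- ===== CLAIM (what is proved, stated in full; the proofs are below) =====
def Claim_equal_normalize_public_username : Prop := ∀ (username : Option String), Dom_normalize_public_username username → Spec_normalize_public_username username (normalize_public_username username)

-- ===== LEMMAS AND PROOFS =====

-- the filter predicate shared by the reasoning
def pvKeep (ch : Char) : Bool :=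
  PySem.Chars.isalnum ch || (ch == '-' || ch == '_' || ch == '.')

-- 'join with single separator char over the whitespace-split', expressed as one pass
def pvJgo (sep : Char) : List Char → Bool → Bool → List Char
  | [], _, _ => []
  | c :: r, s, i =>
    if PySem.Chars.isspace c then pvJgo sep r s true
    else (if i && s then [sep] else []) ++ c :: pvJgo sep r true false

lemma join_snoc (sep : List Char) (xs : List (List Char)) (y : List Char) :
    PySem.Chars.join sep (xs ++ [y])
      = PySem.Chars.join sep xs ++ (if xs.isEmpty then [] else sep) ++ y := by
  induction xs with
  | nil => simp [PySem.Chars.join_nil, PySem.Chars.join_singleton]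
  | cons x xs ih =>
    cases xs with
    | nil => simp [PySem.Chars.join_singleton, PySem.Chars.join_cons_cons]
    | cons z zs =>
      have h1 : (x :: z :: zs) ++ [y] = x :: z :: (zs ++ [y]) := by simp
      rw [h1, PySem.Chars.join_cons_cons,
        show z :: (zs ++ [y]) = (z :: zs) ++ [y] from rfl, ih,
        PySem.Chars.join_cons_cons]
      simp

lemma jgo_i_irrel (sep : Char) (ls : List Char) (i i' : Bool) :
    pvJgo sep ls false i = pvJgo sep ls false i' := by
  cases ls with
  | nil => rfl
  | cons c r => by_cases h : PySem.Chars.isspace c <;> simp [pvJgo, h]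

lemma jgo_all_space (sep : Char) (ls : List Char) :
    ∀ (s i : Bool), (∀ c ∈ ls, PySem.Chars.isspace c) → pvJgo sep ls s i = [] := by
  induction ls with
  | nil => intro s i _; rfl
  | cons d r ih =>
    intro s i h
    have hd : PySem.Chars.isspace d = true := h d (by simp)
    simp only [pvJgo, hd, if_true]
    exact ih s true (fun e he => h e (by simp [he]))

lemma jgo_append_space (sep : Char) (ls spx : List Char) (s i : Bool)
    (h : ∀ c ∈ spx, PySem.Chars.isspace c) :
    pvJgo sep (ls ++ spx) s i = pvJgo sep ls s i := by
  induction ls generalizing s i with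
  | nil => simpa [pvJgo] using jgo_all_space sep spx s i h
  | cons c r ih =>
    by_cases hc : PySem.Chars.isspace c <;> simp [pvJgo, hc, ih]

lemma jgo_lstrip (sep : Char) (ls : List Char) (i : Bool) :
    pvJgo sep (ls.dropWhile PySem.Chars.isspace) false i = pvJgo sep ls false i := by
  induction ls generalizing i with
  | nil => rfl
  | cons c r ih =>
    by_cases hc : PySem.Chars.isspace c
    · rw [List.dropWhile_cons_of_pos hc]
      rw [ih i]
      rw [show pvJgo sep (c :: r) false i = pvJgo sep r false true by simp [pvJgo, hc]]
      exact jgo_i_irrel sep r i true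
    · rw [List.dropWhile_cons_of_neg hc]

lemma jgo_strip (sep : Char) (ls : List Char) :
    pvJgo sep (PySem.Chars.strip ls) false false = pvJgo sep ls false false := by
  unfold PySem.Chars.strip PySem.Chars.rstrip PySem.Chars.lstrip
  have hdec : ls.dropWhile PySem.Chars.isspace
      = ((ls.dropWhile PySem.Chars.isspace).reverse.dropWhile PySem.Chars.isspace).reverse
        ++ ((ls.dropWhile PySem.Chars.isspace).reverse.takeWhile PySem.Chars.isspace).reverse := by
    conv_lhs => rw [← List.reverse_reverse (ls.dropWhile PySem.Chars.isspace)]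
    rw [← List.reverse_append, List.takeWhile_append_dropWhile]
  calc pvJgo sep ((ls.dropWhile PySem.Chars.isspace).reverse.dropWhile PySem.Chars.isspace).reverse false false
      = pvJgo sep (ls.dropWhile PySem.Chars.isspace) false false := by
        conv_rhs => rw [hdec]
        rw [jgo_append_space]
        intro c hc
        exact List.mem_takeWhile_imp (List.mem_reverse.mp hc)
    _ = pvJgo sep ls false false := jgo_lstrip sep ls false

lemma go_inv (sep : Char) (ls cur : List Char) (accW : List (List Char)) :
    PySem.Chars.join [sep] (PySem.Chars.split₀.go ls cur accW)
      = PySem.Chars.join [sep] accW.reverse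
        ++ (if accW.isEmpty || cur.isEmpty then [] else [sep])
        ++ cur.reverse
        ++ pvJgo sep ls (!(accW.isEmpty && cur.isEmpty)) cur.isEmpty := by
  induction ls generalizing cur accW with
  | nil =>
    by_cases hc : cur.isEmpty
    · have : cur = [] := by simpa using hc
      subst this
      simp [PySem.Chars.split₀.go, pvJgo]
    · rw [show PySem.Chars.split₀.go [] cur accW = (cur.reverse :: accW).reverse by
        simp [PySem.Chars.split₀.go, hc]]
      rw [List.reverse_cons, join_snoc]
      simp [pvJgo, hc]
  | cons c r ih =>
    by_cases hs : PySem.Chars.isspace c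
    · by_cases hc : cur.isEmpty
      · have : cur = [] := by simpa using hc
        subst this
        rw [show PySem.Chars.split₀.go (c :: r) [] accW = PySem.Chars.split₀.go r [] accW by
          simp [PySem.Chars.split₀.go, hs]]
        rw [ih]
        by_cases ha : accW.isEmpty
        · simp [ha, pvJgo, hs]
        · simp [ha, pvJgo, hs]
      · rw [show PySem.Chars.split₀.go (c :: r) cur accW
            = PySem.Chars.split₀.go r [] (cur.reverse :: accW) by
          simp [PySem.Chars.split₀.go, hs, hc]]
        rw [ih]
        rw [List.reverse_cons, join_snoc]
        simp [pvJgo, hs, hc]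
    · rw [show PySem.Chars.split₀.go (c :: r) cur accW
          = PySem.Chars.split₀.go r (c :: cur) accW by simp [PySem.Chars.split₀.go, hs]]
      rw [ih]
      by_cases hc : cur.isEmpty
      · have : cur = [] := by simpa using hc
        subst this
        by_cases ha : accW.isEmpty <;> simp [ha, pvJgo, hs]
      · by_cases ha : accW.isEmpty <;> simp [ha, hc, pvJgo, hs]

lemma join_split₀ (sep : Char) (ls : List Char) :
    PySem.Chars.join [sep] (PySem.Chars.split₀ ls) = pvJgo sep ls false false := by
  unfold PySem.Chars.split₀
  rw [go_inv]
  simp [PySem.Chars.join_nil, jgo_i_irrel sep ls true false]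

-- single-char replace is a map
def pvSwap (c : Char) : Char := if c == ' ' then '-' else c

lemma replace_go_map (fuel : Nat) (l acc : List Char) (h : l.length ≤ fuel) :
    PySem.Chars.replace.go [' '] ['-'] fuel l acc = acc.reverse ++ l.map pvSwap := by
  induction fuel generalizing l acc with
  | zero =>
    have : l = [] := by
      cases l with
      | nil => rfl
      | cons c r => simp at h
    subst this; simp [PySem.Chars.replace.go]
  | succ n ih =>
    cases l with
    | nil => simp [PySem.Chars.replace.go]
    | cons c r =>
      by_cases hc : c = ' '
      · subst hc
        rw [show PySem.Chars.replace.go [' '] ['-'] (n+1) (' ' :: r) acc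
            = PySem.Chars.replace.go [' '] ['-'] n r ('-' :: acc) by
          simp [PySem.Chars.replace.go, List.isPrefixOf]]
        rw [ih r ('-' :: acc) (by simpa using Nat.lt_succ_iff.mp (by simpa using h))]
        simp [pvSwap]
      · have hp : (([' '] : List Char).isPrefixOf (c :: r)) = false := by
          simp [List.isPrefixOf]
          exact fun h' => hc h'.symm
        rw [show PySem.Chars.replace.go [' '] ['-'] (n+1) (c :: r) acc
            = PySem.Chars.replace.go [' '] ['-'] n r (c :: acc) by
          simp [PySem.Chars.replace.go, hp]]
        rw [ih r (c :: acc) (by simp at h; omega)]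
        simp [pvSwap, hc]

lemma replace_space_hyphen (x : List Char) :
    PySem.Chars.replace x [' '] ['-'] = x.map pvSwap := by
  unfold PySem.Chars.replace
  rw [if_neg (by simp)]
  exact replace_go_map x.length x [] le_rfl

lemma map_swap_jgo (ls : List Char) (s i : Bool) :
    (pvJgo ' ' ls s i).map pvSwap = pvJgo '-' ls s i := by
  induction ls generalizing s i with
  | nil => rfl
  | cons c r ih =>
    by_cases hs : PySem.Chars.isspace c
    · simp [pvJgo, hs, ih]
    · have hcne : (c == ' ') = false := by
        by_contra hx
        have : c = ' ' := by simpa using (Bool.not_eq_false _).mp hx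
        subst this
        exact hs (by decide)
      by_cases hi : (i && s) = true <;>
        simp [pvJgo, hs, hi, pvSwap, hcne, ih]

lemma foldl_bstep (ls acc : List Char) (s i : Bool) :
    (ls.foldl pvBStep (acc, s, i)).1 = acc ++ (pvJgo '-' ls s i).filter pvKeep := by
  induction ls generalizing acc s i with
  | nil => simp [pvJgo]
  | cons c r ih =>
    by_cases hs : PySem.Chars.isspace c
    · simp [pvBStep, hs, ih, pvJgo]
    · rw [List.foldl_cons]
      rw [show pvBStep (acc, s, i) c
          = (acc ++ (if i && s then ['-'] else [])
              ++ (if PySem.Chars.isalnum c || (c == '-' || c == '_' || c == '.')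
                  then [c] else []), true, false) by simp [pvBStep, hs]]
      rw [ih]
      rw [show pvJgo '-' (c :: r) s i
          = (if i && s then ['-'] else []) ++ c :: pvJgo '-' r true false by
        simp [pvJgo, hs]]
      by_cases hk : pvKeep c = true
      · have hk' := hk
        unfold pvKeep at hk'
        by_cases hi : (i && s) = true <;>
          simp [hi, hk', List.filter, pvKeep]
      · have hk' : (PySem.Chars.isalnum c || (c == '-' || c == '_' || c == '.')) = false := by
          simpa [pvKeep] using hk
        by_cases hi : (i && s) = true <;>
          simp [hi, hk', List.filter, pvKeep]

lemma isspace_lowerChar (c : Char) :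
    PySem.Chars.isspace (PySem.Chars.lowerChar c) = PySem.Chars.isspace c := by
  unfold PySem.Chars.lowerChar
  by_cases h : PySem.Chars.isupper c = true
  · rw [if_pos h]
    unfold PySem.Chars.isupper at h
    simp only [Bool.and_eq_true, decide_eq_true_eq] at h
    have h1 : 65 ≤ c.toNat := h.1
    have h2 : c.toNat ≤ 90 := h.2
    have hv : Nat.isValidChar (c.toNat + 32) := Or.inl (by omega)
    have ht : (Char.ofNat (c.toNat + 32)).toNat = c.toNat + 32 := by
      simp [Char.ofNat, hv]
    unfold PySem.Chars.isspace
    rw [ht, Bool.eq_iff_iff]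
    simp only [Bool.or_eq_true, Bool.and_eq_true, decide_eq_true_eq]
    omega
  · rw [if_neg h]

lemma lower_strip (cs : List Char) :
    PySem.Chars.lower (PySem.Chars.strip cs) = PySem.Chars.strip (PySem.Chars.lower cs) := by
  unfold PySem.Chars.strip PySem.Chars.rstrip PySem.Chars.lstrip PySem.Chars.lower
  have hdw : ∀ (x : List Char),
      (x.map PySem.Chars.lowerChar).dropWhile PySem.Chars.isspace
        = (x.dropWhile PySem.Chars.isspace).map PySem.Chars.lowerChar := by
    intro x
    induction x with
    | nil => rfl
    | cons d r ih =>
      by_cases hsd : PySem.Chars.isspace d = true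
      · rw [List.map_cons,
          List.dropWhile_cons_of_pos (by rw [isspace_lowerChar]; exact hsd),
          List.dropWhile_cons_of_pos hsd, ih]
      · rw [List.map_cons,
          List.dropWhile_cons_of_neg (by rw [isspace_lowerChar]; exact hsd),
          List.dropWhile_cons_of_neg hsd, List.map_cons]
  conv_rhs => rw [hdw, ← List.map_reverse, hdw, ← List.map_reverse]

-- ===== VERDICT (by name: the statement is the Claim_ definition above) =====
theorem normalize_public_username_spec : Claim_equal_normalize_public_username := by
  intro username _
  unfold Spec_normalize_public_username
  cases username with
  | none => rfl
  | some u =>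
    have key : ((PySem.Chars.replace
        (PySem.Chars.join [' '] (PySem.Chars.split₀ (PySem.Chars.lower (PySem.Chars.strip u.toList)))) [' '] ['-']).filter
          (fun ch => PySem.Chars.isalnum ch || (ch == '-' || ch == '_' || ch == '.')))
        = ((PySem.Chars.lower u.toList).foldl pvBStep ([], false, false)).1 := by
      rw [lower_strip, join_split₀, jgo_strip, replace_space_hyphen, map_swap_jgo, foldl_bstep]
      rfl
    simp only [normalize_public_username, normalize_public_username_alt,
      PySem.Str.stripChars, PySem.Str.lower, PySem.Str.strip, PySem.Str.join,
      PySem.Str.split₀, PySem.Str.replace, String.toList_ofList, List.map_map,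
      Function.comp_def, List.map_id']
    rw [show (" " : String).toList = [' '] by decide, show ("-" : String).toList = ['-'] by decide]
    rw [key]
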